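-- pv_equiv track=rewrite | github.com/sweetd0vee/kpi-agent-backend | src/services/goal_export.py | _parse_semicolon_block
-- ===== SOURCE A (Python) =====
-- from typing import Callable, Dict, List, Optional, Tuple
--
-- _MIN_TABLE_COLS = 4
--
-- def _parse_semicolon_block(block: str) -> List[List[str]]:
--     rows: List[List[str]] = []
--     for line in block.split("\n"):
--         line = line.strip()
--         if not line or ";" not in line:
--             continue
--         cells: List[str] = []
--         current = ""
--         in_quotes = False
--         for c in line:
--             if c == '"':
--                 in_quotes = not in_quotes
--                 current += c
--             elif c == ";" and not in_quotes:
--                 cells.append(current.strip().strip('"'))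
--                 current = ""
--             else:
--                 current += c
--         cells.append(str(current.strip().strip('"') or ""))
--         if len(cells) >= _MIN_TABLE_COLS:
--             rows.append(cells)
--     return rows
-- ===== SOURCE B (Python) =====
-- _MIN_TABLE_COLS = 4
--
-- def _parse_semicolon_block(block):
--     def cells_of(line):
--         merged = []
--         group = []
--         for part in line.split(";"):
--             group.append(part)
--             if sum(p.count('"') for p in group) % 2 == 0:
--                 merged.append(";".join(group))
--                 group = []
--         if group:
--             merged.append(";".join(group))
--         return [m.strip().strip('"') for m in merged]
--     lines = [l.strip() for l in block.split("\n")]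
--     tables = [cells_of(l) for l in lines if l and ";" in l]
--     return [cells for cells in tables if len(cells) >= _MIN_TABLE_COLS]
-- ===== Notes on version B (the rewrite author's own statement) =====
-- stated objective: alternative
-- what changed: Replaces A's single accumulating loop with a per-character in_quotes state machine by staged list pipelines: each line is split on the semicolon separator first, the parts are grouped by even accumulated quote count and re-joined per group, and the rows are produced by map/filter comprehensions instead of an accumulator loop.
import Mathlib
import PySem

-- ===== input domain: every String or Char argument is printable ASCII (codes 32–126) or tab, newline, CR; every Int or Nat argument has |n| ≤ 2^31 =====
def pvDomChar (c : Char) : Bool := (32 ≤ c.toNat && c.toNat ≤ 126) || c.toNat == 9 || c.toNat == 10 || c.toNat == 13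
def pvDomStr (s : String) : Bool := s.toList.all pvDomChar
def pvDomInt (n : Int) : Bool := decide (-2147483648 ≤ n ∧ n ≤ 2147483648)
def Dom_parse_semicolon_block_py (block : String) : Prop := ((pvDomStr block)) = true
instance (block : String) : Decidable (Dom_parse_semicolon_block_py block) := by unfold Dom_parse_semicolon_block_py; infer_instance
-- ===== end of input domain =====

-- B replaces A's per-character in_quotes state machine by staged list pipelines: split each
-- line on the semicolon separator, group the parts by even accumulated quote count, re-join each group,
-- then strip/filter the candidate rows with comprehension-style passes ('alternative').

-- ===== PORT A =====
-- cell.strip().strip('"')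
def pvClean (cs : List Char) : List Char :=
  PySem.Chars.stripChars (PySem.Chars.strip cs) ['"']

-- the body of A's inner `for c in line` loop, state = (cells, current, in_quotes)
def pvAStep (st : List (List Char) × List Char × Bool) (c : Char) :
    List (List Char) × List Char × Bool :=
  match st with
  | (cells, current, inq) =>
    if c = '"' then (cells, current ++ [c], !inq)
    else if c = ';' ∧ inq = false then (cells ++ [pvClean current], [], inq)
    else (cells, current ++ [c], inq)

-- A's inner loop plus the trailing `cells.append(str(current.strip().strip('"') or ""))`
def pvALine (line : List Char) : List (List Char) :=
  let st := line.foldl pvAStep ([], [], false)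
  let t := pvClean st.2.1
  st.1 ++ [if t.isEmpty then [] else t]

def parse_semicolon_block_py (block : String) : List (List String) :=
  (PySem.Chars.splitOn block.toList ['\n']).foldl (fun rows lineRaw =>
    let line := PySem.Chars.strip lineRaw
    if line.isEmpty ∨ PySem.Chars.isIn [';'] line = false then rows
    else
      let cells := pvALine line
      if 4 ≤ cells.length then rows ++ [cells.map String.mk] else rows) []

-- ===== PORT B =====
-- body of B's `for part in line.split(';')` loop, state = (merged, group)
def pvGroupStep (st : List (List Char) × List (List Char)) (part : List Char) :
    List (List Char) × List (List Char) :=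
  let group := st.2 ++ [part]
  if (group.map (fun p => PySem.Chars.count p ['"'])).sum % 2 = 0 then
    (st.1 ++ [List.intercalate [';'] group], [])
  else (st.1, group)

-- B's `cells_of`: group parts by quote parity, re-join, then strip each merged cell
def pvCellsOf (line : List Char) : List (List Char) :=
  let st := (PySem.Chars.splitOn line [';']).foldl pvGroupStep ([], [])
  let merged := if st.2.isEmpty then st.1 else st.1 ++ [List.intercalate [';'] st.2]
  merged.map pvClean

def parse_semicolon_block_py_alt (block : String) : List (List String) :=
  let lines := (PySem.Chars.splitOn block.toList ['\n']).map PySem.Chars.strip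
  let tables := (lines.filter (fun l => !l.isEmpty && PySem.Chars.isIn [';'] l)).map pvCellsOf
  (tables.filter (fun cells => decide (4 ≤ cells.length))).map (·.map String.mk)

-- ===== PRECONDITION & SPEC =====
def Spec_parse_semicolon_block_py (block : String) (out : List (List String)) : Prop := out = parse_semicolon_block_py_alt block
instance (block : String) (out : List (List String)) : Decidable (Spec_parse_semicolon_block_py block out) := by unfold Spec_parse_semicolon_block_py; infer_instance

-- ===== CLAIM (what is proved, stated in full; the proofs are below) =====
def Claim_equal_parse_semicolon_block_py : Prop := ∀ (block : String), Dom_parse_semicolon_block_py block → Spec_parse_semicolon_block_py block (parse_semicolon_block_py block)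

-- ===== LEMMAS AND PROOFS =====

-- reference single-';' splitter (proved equal to PySem.Chars.splitOn · [';'])
def pvSplit : List Char → List (List Char)
  | [] => [[]]
  | c :: rest =>
    if c = ';' then [] :: pvSplit rest
    else
      match pvSplit rest with
      | [] => [[c]]
      | p :: ps => (c :: p) :: ps

-- reference recursion for A's inner loop
def pvARec : List Char → List Char → Bool → List (List Char)
  | [], cur, _ => [pvClean cur]
  | c :: rest, cur, inq =>
    if c = '"' then pvARec rest (cur ++ [c]) (!inq)
    else if c = ';' ∧ inq = false then pvClean cur :: pvARec rest [] inq
    else pvARec rest (cur ++ [c]) inq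

-- bridge recursion between the two sides, accumulator = merged-so-far buffer
def pvBRec : List (List Char) → List Char → List (List Char)
  | [], cur => [pvClean cur]
  | p :: ps, cur =>
    let b := cur ++ p
    if ps.isEmpty then [pvClean b]
    else if b.count '"' % 2 = 0 then pvClean b :: pvBRec ps []
    else pvBRec ps (b ++ [';'])

-- reference recursion for B's grouping loop (including the post-loop flush), raw cells
def pvMerge : List (List Char) → List (List Char) → List (List Char)
  | [], group => if group.isEmpty then [] else [List.intercalate [';'] group]
  | p :: ps, group =>
    let g := group ++ [p]
    if (g.map (fun q => PySem.Chars.count q ['"'])).sum % 2 = 0 then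
      List.intercalate [';'] g :: pvMerge ps []
    else pvMerge ps g

theorem pvCount_go_eq (fuel : Nat) (l : List Char) (acc : Nat) (h : l.length ≤ fuel) :
    PySem.Chars.count.go ['"'] fuel l acc = acc + l.count '"' := by
  induction fuel generalizing l acc with
  | zero =>
    interval_cases hl : l.length
    · rw [List.length_eq_zero_iff] at hl; subst hl; simp [PySem.Chars.count.go]
  | succ f ih =>
    cases l with
    | nil => simp [PySem.Chars.count.go]
    | cons c t =>
      simp only [List.length_cons] at h
      by_cases hc : c = '"'
      · subst hc
        have hb : ((['"'] : List Char).isPrefixOf ('"' :: t)) = true := by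
          simp [List.isPrefixOf]
        simp only [PySem.Chars.count.go, hb, if_pos]
        rw [show List.drop (List.length (['"'] : List Char)) ('"' :: t) = t from rfl]
        rw [ih t (acc + 1) (by omega)]
        simp
        omega
      · have hb : ((['"'] : List Char).isPrefixOf (c :: t)) = false := by
          simp only [List.isPrefixOf, Bool.and_eq_false_iff]
          left
          simpa [beq_iff_eq] using fun h => hc h.symm
        simp only [PySem.Chars.count.go, hb, Bool.false_eq_true, if_false]
        rw [ih t acc (by omega)]
        simp [hc]

theorem pvCount_eq (l : List Char) : PySem.Chars.count l ['"'] = l.count '"' := by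
  simp [PySem.Chars.count, pvCount_go_eq l.length l 0 (by omega)]

theorem pvSplit_ne_nil (l : List Char) : pvSplit l ≠ [] := by
  cases l with
  | nil => simp [pvSplit]
  | cons c rest =>
    simp only [pvSplit]
    split_ifs
    · simp
    · cases h : pvSplit rest <;> simp

theorem pvSplitOn_go_eq (fuel : Nat) (l cur : List Char) (acc : List (List Char))
    (h : l.length ≤ fuel) :
    PySem.Chars.splitOn.go [';'] fuel l cur acc
      = acc.reverse ++ (pvSplit l).modifyHead (cur.reverse ++ ·) := by
  induction fuel generalizing l cur acc with
  | zero =>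
    interval_cases hl : l.length
    · rw [List.length_eq_zero_iff] at hl; subst hl
      simp [PySem.Chars.splitOn.go, pvSplit]
  | succ f ih =>
    cases l with
    | nil => simp [PySem.Chars.splitOn.go, pvSplit]
    | cons c t =>
      simp only [List.length_cons] at h
      by_cases hc : c = ';'
      · subst hc
        have hb : (([';'] : List Char).isPrefixOf (';' :: t)) = true := by
          simp [List.isPrefixOf]
        simp only [PySem.Chars.splitOn.go, hb, if_pos]
        rw [show List.drop (List.length [';']) (';' :: t) = t by simp]
        rw [ih t [] (cur.reverse :: acc) (by omega)]
        simp only [pvSplit, reduceIte]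
        cases hs : pvSplit t with
        | nil => exact absurd hs (pvSplit_ne_nil t)
        | cons p ps => simp
      · have hb : (([';'] : List Char).isPrefixOf (c :: t)) = false := by
          simp only [List.isPrefixOf, Bool.and_eq_false_iff]
          left
          simpa [beq_iff_eq] using fun h => hc h.symm
        simp only [PySem.Chars.splitOn.go, hb]
        simp only [Bool.false_eq_true, if_false]
        rw [ih t (c :: cur) acc (by omega)]
        simp only [pvSplit, if_neg hc]
        cases hs : pvSplit t with
        | nil => exact absurd hs (pvSplit_ne_nil t)
        | cons p ps => simp

theorem pvSplitOn_eq (l : List Char) : PySem.Chars.splitOn l [';'] = pvSplit l := by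
  have := pvSplitOn_go_eq (l.length + 1) l [] [] (by omega)
  simp only [PySem.Chars.splitOn, this, List.reverse_nil, List.nil_append]
  cases hs : pvSplit l with
  | nil => exact absurd hs (pvSplit_ne_nil l)
  | cons p ps => simp

-- A's foldl equals the reference recursion
theorem pvAFold (line : List Char) (cells : List (List Char)) (cur : List Char) (inq : Bool) :
    (line.foldl pvAStep (cells, cur, inq)).1
      ++ [pvClean (line.foldl pvAStep (cells, cur, inq)).2.1]
      = cells ++ pvARec line cur inq := by
  induction line generalizing cells cur inq with
  | nil => simp [pvARec]
  | cons c rest ih =>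
    simp only [List.foldl_cons, pvAStep, pvARec]
    by_cases h1 : c = '"'
    · simp only [if_pos h1, ih]
    · by_cases h2 : c = ';' ∧ inq = false
      · simp only [if_neg h1, if_pos h2, ih, List.append_assoc, List.singleton_append]
      · simp only [if_neg h1, if_neg h2, ih]

-- B's grouping foldl (plus flush) equals pvMerge
theorem pvGroupFold (ps : List (List Char)) (merged group : List (List Char)) :
    (let st := ps.foldl pvGroupStep (merged, group)
     if st.2.isEmpty then st.1 else st.1 ++ [List.intercalate [';'] st.2])
      = merged ++ pvMerge ps group := by
  induction ps generalizing merged group with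
  | nil =>
    simp only [List.foldl_nil, pvMerge]
    cases group <;> simp
  | cons p ps ih =>
    simp only [List.foldl_cons, pvGroupStep, pvMerge]
    by_cases hc : ((group ++ [p]).map (fun q => PySem.Chars.count q ['"'])).sum % 2 = 0
    · simp only [if_pos hc, ih, List.append_assoc, List.singleton_append]
    · simp only [if_neg hc, ih]

-- count of a ';'-join = sum of the parts' counts
theorem pvCount_intercalate (g : List (List Char)) :
    (List.intercalate [';'] g).count '"' = (g.map (fun q => q.count '"')).sum := by
  induction g with
  | nil => simp [List.intercalate]
  | cons p ps ih =>
    cases ps with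
    | nil => simp [List.intercalate]
    | cons q qs =>
      have h1 : List.intercalate [';'] (p :: q :: qs)
          = p ++ [';'] ++ List.intercalate [';'] (q :: qs) := by
        simp [List.intercalate, List.intersperse]
      rw [h1]
      simp only [List.count_append, ih, List.map_cons, List.sum_cons]
      have : List.count '"' [';'] = 0 := by decide
      omega

-- join of a group extended by one part
theorem pvJoin_snoc (g : List (List Char)) (p : List Char) (h : g ≠ []) :
    List.intercalate [';'] (g ++ [p]) = List.intercalate [';'] g ++ [';'] ++ p := by
  induction g with
  | nil => exact absurd rfl h
  | cons q qs ih =>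
    cases qs with
    | nil => simp [List.intercalate, List.intersperse]
    | cons r rs =>
      have h1 : ∀ ws : List (List Char),
          List.intercalate [';'] (q :: r :: ws)
            = q ++ [';'] ++ List.intercalate [';'] (r :: ws) := by
        intro ws; simp [List.intercalate, List.intersperse]
      rw [show (q :: r :: rs) ++ [p] = q :: ((r :: rs) ++ [p]) from rfl]
      rw [show (r :: rs) ++ [p] = r :: (rs ++ [p]) from rfl, h1, h1]
      rw [show r :: (rs ++ [p]) = (r :: rs) ++ [p] from rfl, ih (by simp)]
      simp [List.append_assoc]

-- the pre-buffer corresponding to a pending group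
def pvPre (g : List (List Char)) : List Char :=
  if g.isEmpty then [] else List.intercalate [';'] g ++ [';']

theorem pvPre_snoc (g : List (List Char)) (p : List Char) :
    pvPre g ++ p = List.intercalate [';'] (g ++ [p]) := by
  cases g with
  | nil => simp [pvPre, List.intercalate, List.intersperse]
  | cons q qs =>
    simp only [pvPre, List.isEmpty_cons, Bool.false_eq_true, if_false]
    rw [pvJoin_snoc (q :: qs) p (by simp)]

-- pvMerge (with final clean pass) = the bridge recursion pvBRec
theorem pvMerge_eq_pvBRec (ps : List (List Char)) (g : List (List Char)) (h : ps ≠ []) :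
    (pvMerge ps g).map pvClean = pvBRec ps (pvPre g) := by
  induction ps generalizing g with
  | nil => exact absurd rfl h
  | cons p ps ih =>
    simp only [pvMerge, pvBRec, pvPre_snoc, pvCount_eq]
    have hcnt : ((g ++ [p]).map (fun q => List.count '"' q)).sum % 2 = 0
        ↔ (List.intercalate [';'] (g ++ [p])).count '"' % 2 = 0 := by
      rw [pvCount_intercalate]
    cases hps : ps with
    | nil =>
      simp only [List.isEmpty_nil, if_true]
      by_cases hc : ((g ++ [p]).map (fun q => List.count '"' q)).sum % 2 = 0
      · simp [hc, pvMerge]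
      · simp [hc, pvMerge]
    | cons q qs =>
      rw [← hps]
      have hne : ps ≠ [] := by rw [hps]; simp
      simp only [show ps.isEmpty = false from by rw [hps]; rfl, Bool.false_eq_true, if_false]
      by_cases hc : ((g ++ [p]).map (fun q => List.count '"' q)).sum % 2 = 0
      · rw [if_pos hc, if_pos (hcnt.1 hc), List.map_cons, ih [] hne]
        simp [pvPre]
      · rw [if_neg hc, if_neg (fun hx => hc (hcnt.2 hx)), ih (g ++ [p]) hne]
        have : pvPre (g ++ [p]) = List.intercalate [';'] (g ++ [p]) ++ [';'] := by
          simp [pvPre]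
        rw [this]

-- prepending a char to the head part of the split = appending it to the accumulator
theorem pvBRec_head_cons (c : Char) (p : List Char) (ps : List (List Char)) (cur : List Char) :
    pvBRec ((c :: p) :: ps) cur = pvBRec (p :: ps) (cur ++ [c]) := by
  simp [pvBRec, List.append_assoc]

theorem pvARec_cons (c : Char) (rest cur : List Char) (inq : Bool) :
    pvARec (c :: rest) cur inq
      = if c = '"' then pvARec rest (cur ++ [c]) (!inq)
        else if c = ';' ∧ inq = false then pvClean cur :: pvARec rest [] inq
        else pvARec rest (cur ++ [c]) inq := rfl

theorem pvBRec_cons (p : List Char) (ps : List (List Char)) (cur : List Char) :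
    pvBRec (p :: ps) cur
      = if ps.isEmpty then [pvClean (cur ++ p)]
        else if (cur ++ p).count '"' % 2 = 0 then pvClean (cur ++ p) :: pvBRec ps []
        else pvBRec ps ((cur ++ p) ++ [';']) := rfl

-- THE CORE: A's character state machine = the parity merge of the split parts
theorem pvCore (line : List Char) : ∀ cur : List Char,
    pvARec line cur (decide (cur.count '"' % 2 = 1)) = pvBRec (pvSplit line) cur := by
  induction line with
  | nil => intro cur; simp [pvARec, pvSplit, pvBRec]
  | cons c rest ih =>
    intro cur
    obtain ⟨q, qs, hs⟩ : ∃ q qs, pvSplit rest = q :: qs := by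
      cases h : pvSplit rest with
      | nil => exact absurd h (pvSplit_ne_nil rest)
      | cons q qs => exact ⟨q, qs, rfl⟩
    by_cases hc : c = ';'
    · subst hc
      have hsplit : pvSplit (';' :: rest) = [] :: q :: qs := by simp [pvSplit, hs]
      rw [hsplit, pvARec_cons, pvBRec_cons,
        if_neg (by decide : ¬ (';' : Char) = '"')]
      simp only [List.append_nil, List.isEmpty_cons, Bool.false_eq_true, if_false]
      by_cases hp : cur.count '"' % 2 = 0
      · have hinq : (decide (cur.count '"' % 2 = 1)) = false := decide_eq_false (by omega)
        rw [hinq, if_pos (show True ∧ (false:Bool) = false from ⟨trivial, rfl⟩), if_pos hp]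
        have h0 := ih []
        rw [(by decide : (decide (List.count '"' ([] : List Char) % 2 = 1)) = false)] at h0
        rw [h0, hs]
      · have hinq : (decide (cur.count '"' % 2 = 1)) = true := by
          have := Nat.mod_two_eq_zero_or_one (cur.count '"')
          simp only [decide_eq_true_eq]
          omega
        rw [hinq, if_neg (by simp), if_neg hp]
        have hcnt : (cur ++ [';']).count '"' = cur.count '"' := by
          simp [List.count_append]
        have h1 := ih (cur ++ [';'])
        rw [hcnt, hinq] at h1
        rw [h1, hs]
    · have hsplit : pvSplit (c :: rest) = (c :: q) :: qs := by simp [pvSplit, hc, hs]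
      rw [hsplit, pvBRec_head_cons, ← hs]
      by_cases hq : c = '"'
      · subst hq
        rw [pvARec_cons, if_pos rfl]
        have hcnt : (cur ++ ['"']).count '"' = cur.count '"' + 1 := by
          simp [List.count_append]
        have hpar : (decide ((cur ++ ['"']).count '"' % 2 = 1))
            = !(decide (cur.count '"' % 2 = 1)) := by
          rw [hcnt]
          rcases Nat.mod_two_eq_zero_or_one (cur.count '"') with h | h <;>
            simp [Nat.add_mod, h]
        rw [← hpar, ih (cur ++ ['"'])]
      · rw [pvARec_cons, if_neg hq, if_neg (by simp [hc])]
        have hcnt : (cur ++ [c]).count '"' = cur.count '"' := by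
          have : List.count '"' [c] = 0 :=
            List.count_eq_zero.mpr (by simpa using fun h => hq h.symm)
          simp [List.count_append, this]
        have h1 := ih (cur ++ [c])
        rw [hcnt] at h1
        rw [h1]

-- the two inner-line computations agree
theorem pvLine_eq (l : List Char) : pvALine l = pvCellsOf l := by
  have hfinal : ∀ cs : List Char,
      (if (pvClean cs).isEmpty then ([] : List Char) else pvClean cs) = pvClean cs := by
    intro cs
    cases h : pvClean cs <;> simp
  have hA : pvALine l = pvARec l [] false := by
    have := pvAFold l [] [] false
    simp only [pvALine, hfinal, List.nil_append] at *
    exact this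
  have hB : pvCellsOf l = (pvMerge (PySem.Chars.splitOn l [';']) []).map pvClean := by
    simp only [pvCellsOf, pvGroupFold, List.nil_append]
  rw [hA, hB, pvSplitOn_eq, pvMerge_eq_pvBRec _ _ (pvSplit_ne_nil l)]
  have hC := pvCore l []
  rw [(by decide : (decide (List.count '"' ([] : List Char) % 2 = 1)) = false)] at hC
  simpa [pvPre] using hC

-- A's accumulating foldl over lines = B's map/filter pipeline
theorem pvOuter (ls : List (List Char)) (acc : List (List String)) :
    ls.foldl (fun rows lineRaw =>
      let line := PySem.Chars.strip lineRaw
      if line.isEmpty ∨ PySem.Chars.isIn [';'] line = false then rows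
      else
        let cells := pvALine line
        if 4 ≤ cells.length then rows ++ [cells.map String.mk] else rows) acc
      = acc ++ ((((ls.map PySem.Chars.strip).filter
            (fun l => !l.isEmpty && PySem.Chars.isIn [';'] l)).map pvCellsOf).filter
            (fun cells => decide (4 ≤ cells.length))).map (·.map String.mk) := by
  induction ls generalizing acc with
  | nil => simp
  | cons l ls ih =>
    simp only [List.foldl_cons, List.map_cons]
    by_cases h1 : (PySem.Chars.strip l).isEmpty = true
        ∨ PySem.Chars.isIn [';'] (PySem.Chars.strip l) = false
    · have hf : (!(PySem.Chars.strip l).isEmpty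
          && PySem.Chars.isIn [';'] (PySem.Chars.strip l)) = false := by
        rcases h1 with h | h <;> simp [h]
      rw [if_pos h1, ih]
      simp [List.filter_cons, hf]
    · have hf : (!(PySem.Chars.strip l).isEmpty
          && PySem.Chars.isIn [';'] (PySem.Chars.strip l)) = true := by
        push_neg at h1
        simp [h1.1, h1.2]
      rw [if_neg h1, ih]
      rw [pvLine_eq]
      simp only [List.filter_cons, hf, if_pos, List.map_cons]
      by_cases h2 : 4 ≤ (pvCellsOf (PySem.Chars.strip l)).length
      · simp [List.filter_cons, h2, List.append_assoc]
      · simp [List.filter_cons, h2]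

-- ===== VERDICT (by name: the statement is the Claim_ definition above) =====
theorem parse_semicolon_block_py_spec : Claim_equal_parse_semicolon_block_py := by
  intro block _
  unfold Spec_parse_semicolon_block_py
  unfold parse_semicolon_block_py parse_semicolon_block_py_alt
  rw [pvOuter]
  simp
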